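-- pv_equiv track=rewrite | github.com/maiziex/AncestralCall | bin/Evaluate_derived_sv_by_flankingseq_align_for_ins.py | check_clipping_not_at_the_beginning
-- ===== SOURCE A (Python) =====
-- def check_clipping_not_at_the_beginning(cigar):
--     flag = 0
--     if "H" not in cigar and "S" not in cigar:
--         flag = 1
--     else:
--         cigar_len = len(cigar)
--         cigar_list = []
--         num_string = ""
--         for i in range(cigar_len):
--             letter = cigar[i]
--             if letter.isalpha():
--                 cigar_list.append(num_string)
--                 num_string = ""
--                 cigar_list.append(letter)
--             else:
--                 num_string += letter
--         if cigar_list[1] == "S" or cigar_list[1] == "H":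
--             flag = 0
--         else:
--             flag = 1
--     return flag
-- ===== SOURCE B (Python) =====
-- def check_clipping_not_at_the_beginning(cigar):
--     for ch in cigar:
--         if ch.isalpha():
--             return 0 if ch in ('S', 'H') else 1
--     return 1
-- ===== Notes on version B (the rewrite author's own statement) =====
-- stated objective: simpler
-- what changed: B replaces A's two substring membership pre-checks plus full tokenisation of the CIGAR string into a num/letter list with a single early-terminating scan that returns at the first alphabetic character (0 if it is 'S' or 'H', else 1), returning 1 if no letter exists.
import Mathlib
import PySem

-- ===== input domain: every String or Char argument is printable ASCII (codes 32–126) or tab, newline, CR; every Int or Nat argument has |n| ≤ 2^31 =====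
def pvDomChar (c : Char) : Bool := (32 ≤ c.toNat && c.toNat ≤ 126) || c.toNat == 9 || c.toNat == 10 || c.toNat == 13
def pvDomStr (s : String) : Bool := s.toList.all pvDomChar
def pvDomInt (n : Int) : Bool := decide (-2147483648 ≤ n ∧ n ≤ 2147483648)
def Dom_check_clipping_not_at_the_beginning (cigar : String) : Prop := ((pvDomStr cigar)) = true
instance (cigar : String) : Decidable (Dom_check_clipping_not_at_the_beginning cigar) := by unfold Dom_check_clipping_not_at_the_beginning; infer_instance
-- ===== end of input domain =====

-- B replaces A's membership pre-check plus full CIGAR tokenisation with one early-terminating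
-- scan for the first operation letter (objective: simpler).

-- ===== PORT A =====
-- A's for-loop over cigar[i] builds (cigar_list, num_string); ported as a foldl over the characters
-- carrying the same pair of state variables.
def check_clipping_not_at_the_beginning (cigar : String) : Int :=
  if ¬ PySem.Str.isIn "H" cigar ∧ ¬ PySem.Str.isIn "S" cigar then 1
  else
    let st := cigar.toList.foldl
      (fun (st : List String × String) letter =>
        if PySem.Chars.isalpha letter then
          (st.1 ++ [st.2, String.singleton letter], "")
        else
          (st.1, st.2.push letter)) ([], "")
    -- cigar_list[1]: none = IndexError, unreachable here since this branch implies an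
    -- alphabetic character ('H' or 'S') occurs in cigar
    match st.1[1]? with
    | some s => if s = "S" ∨ s = "H" then 0 else 1
    | none => 1

-- ===== PORT B =====
def pvAltGo : List Char → Int
  | [] => 1
  | c :: cs => if PySem.Chars.isalpha c then (if c = 'S' ∨ c = 'H' then 0 else 1) else pvAltGo cs

def check_clipping_not_at_the_beginning_alt (cigar : String) : Int :=
  pvAltGo cigar.toList

-- ===== PRECONDITION & SPEC =====
def Spec_check_clipping_not_at_the_beginning (cigar : String) (out : Int) : Prop := out = check_clipping_not_at_the_beginning_alt cigar
instance (cigar : String) (out : Int) : Decidable (Spec_check_clipping_not_at_the_beginning cigar out) := by unfold Spec_check_clipping_not_at_the_beginning; infer_instance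

-- ===== CLAIM (what is proved, stated in full; the proofs are below) =====
def Claim_equal_check_clipping_not_at_the_beginning : Prop := ∀ (cigar : String), Dom_check_clipping_not_at_the_beginning cigar → Spec_check_clipping_not_at_the_beginning cigar (check_clipping_not_at_the_beginning cigar)

-- ===== LEMMAS AND PROOFS =====

-- specification of the token list A's loop builds
def pvParse : List Char → String → List String
  | [], _ => []
  | c :: cs, num =>
    if PySem.Chars.isalpha c then num :: String.singleton c :: pvParse cs ""
    else pvParse cs (num.push c)

theorem pvFold_fst (cs : List Char) : ∀ (acc : List String) (num : String),
    (cs.foldl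
      (fun (st : List String × String) letter =>
        if PySem.Chars.isalpha letter then
          (st.1 ++ [st.2, String.singleton letter], "")
        else
          (st.1, st.2.push letter)) (acc, num)).1 = acc ++ pvParse cs num := by
  induction cs with
  | nil => intro acc num; simp [pvParse]
  | cons c cs ih =>
    intro acc num
    by_cases h : PySem.Chars.isalpha c = true
    · simp [pvParse, h, ih]
    · simp [pvParse, h, ih]

theorem pvAltGo_of_no_SH (cs : List Char) (hS : 'S' ∉ cs) (hH : 'H' ∉ cs) : pvAltGo cs = 1 := by
  induction cs with
  | nil => rfl
  | cons c cs ih =>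
    simp only [List.mem_cons, not_or] at hS hH
    by_cases h : PySem.Chars.isalpha c = true
    · simp [pvAltGo, h, Ne.symm hS.1, Ne.symm hH.1]
    · simp [pvAltGo, h]
      exact ih hS.2 hH.2

theorem pvParse_key (cs : List Char) : ∀ num : String, (∃ c ∈ cs, PySem.Chars.isalpha c = true) →
    (match (pvParse cs num)[1]? with
      | some s => if s = "S" ∨ s = "H" then (0 : Int) else 1
      | none => 1) = pvAltGo cs := by
  induction cs with
  | nil => intro num h; simp at h
  | cons c cs ih =>
    intro num h
    by_cases hc : PySem.Chars.isalpha c = true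
    · have e1 : (String.singleton c = "S") ↔ c = 'S' := by
        constructor
        · intro h1; have := congrArg String.toList h1; simpa using this
        · rintro rfl; rfl
      have e2 : (String.singleton c = "H") ↔ c = 'H' := by
        constructor
        · intro h1; have := congrArg String.toList h1; simpa using this
        · rintro rfl; rfl
      simp [pvParse, hc, pvAltGo, e1, e2]
    · have h' : ∃ d ∈ cs, PySem.Chars.isalpha d = true := by
        rcases h with ⟨d, hd, hda⟩
        rcases List.mem_cons.mp hd with rfl | hd'
        · exact absurd hda hc
        · exact ⟨d, hd', hda⟩
      simp [pvParse, hc, pvAltGo, ih _ h']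

theorem pvMem_of_isIn_singleton (c : Char) (s : String) (h : PySem.Str.isIn (String.singleton c) s = true) :
    c ∈ s.toList := by
  have := (PySem.Str.isIn_iff_infix _ _).mp h
  simp only [String.toList_singleton] at this
  exact this.mem (by simp)

-- ===== VERDICT (by name: the statement is the Claim_ definition above) =====
theorem check_clipping_not_at_the_beginning_spec : Claim_equal_check_clipping_not_at_the_beginning := by
  intro cigar _
  unfold Spec_check_clipping_not_at_the_beginning check_clipping_not_at_the_beginning
    check_clipping_not_at_the_beginning_alt
  by_cases hcase : ¬ PySem.Str.isIn "H" cigar ∧ ¬ PySem.Str.isIn "S" cigar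
  · rw [if_pos hcase]
    have hH : 'H' ∉ cigar.toList := fun hm => hcase.1 (by
      rw [PySem.Str.isIn_iff_infix]
      simp only [show ("H" : String).toList = ['H'] from rfl]
      rcases List.append_of_mem hm with ⟨s, t, hst⟩
      exact ⟨s, t, by simpa using hst.symm⟩)
    have hS : 'S' ∉ cigar.toList := fun hm => hcase.2 (by
      rw [PySem.Str.isIn_iff_infix]
      simp only [show ("S" : String).toList = ['S'] from rfl]
      rcases List.append_of_mem hm with ⟨s, t, hst⟩
      exact ⟨s, t, by simpa using hst.symm⟩)
    exact (pvAltGo_of_no_SH cigar.toList hS hH).symm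
  · rw [if_neg hcase]
    have hex : ∃ c ∈ cigar.toList, PySem.Chars.isalpha c = true := by
      rcases not_and_or.mp hcase with h | h
      · have hm := pvMem_of_isIn_singleton 'H' cigar (by
          have : PySem.Str.isIn "H" cigar = true := by
            by_contra hne
            exact h (fun hh => hne hh)
          simpa using this)
        exact ⟨'H', hm, by decide⟩
      · have hm := pvMem_of_isIn_singleton 'S' cigar (by
          have : PySem.Str.isIn "S" cigar = true := by
            by_contra hne
            exact h (fun hh => hne hh)
          simpa using this)
        exact ⟨'S', hm, by decide⟩
    have := pvParse_key cigar.toList "" hex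
    simp only [pvFold_fst cigar.toList [] "", List.nil_append]
    exact this
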